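-- pv_equiv track=rewrite | github.com/SmarterCL/smarteros-agents | mcp-server/utils/rut.py | format_rut
-- ===== SOURCE A (Python) =====
-- def normalize_rut(rut: str) -> str:
--     """
--     Normalize RUT to standard format (12345678-9)
--
--     Args:
--         rut: RUT in any format
--
--     Returns:
--         Normalized RUT string
--
--     Examples:
--         >>> normalize_rut("12.345.678-9")
--         "12345678-9"
--         >>> normalize_rut("12345678-9")
--         "12345678-9"
--     """
--     # Remove dots and spaces
--     rut = rut.replace(".", "").replace(" ", "").upper()
--
--     # Ensure dash is present
--     if "-" not in rut:
--         # Assume last character is DV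
--         rut = f"{rut[:-1]}-{rut[-1]}"
--
--     return rut
--
-- def format_rut(rut: str, with_dots: bool = False) -> str:
--     """
--     Format RUT for display
--
--     Args:
--         rut: RUT string
--         with_dots: Include thousand separators (12.345.678-9)
--
--     Returns:
--         Formatted RUT
--
--     Examples:
--         >>> format_rut("76958020-3", with_dots=True)
--         "76.958.020-3"
--         >>> format_rut("76958020-3", with_dots=False)
--         "76958020-3"
--     """
--     rut = normalize_rut(rut)
--
--     if not with_dots:
--         return rut
--
--     body, dv = rut.split("-")
--
--     # Add thousand separators
--     formatted_body = ""
--     for i, digit in enumerate(reversed(body)):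
--         if i > 0 and i % 3 == 0:
--             formatted_body = "." + formatted_body
--         formatted_body = digit + formatted_body
--
--     return f"{formatted_body}-{dv}"
-- ===== SOURCE B (Python) =====
-- def format_rut(rut: str, with_dots: bool = False) -> str:
--     cleaned = rut.replace(".", "").replace(" ", "").upper()
--     if "-" not in cleaned:
--         cleaned = cleaned[:-1] + "-" + cleaned[-1]
--     if not with_dots:
--         return cleaned
--     body, dv = cleaned.split("-")
--     groups = [body[max(0, i - 3):i] for i in range(len(body), 0, -3)]
--     return ".".join(reversed(groups)) + "-" + dv
-- ===== Notes on version B (the rewrite author's own statement) =====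
-- stated objective: faster
-- what changed: format_rut's character-by-character loop that repeatedly prepends to the accumulated string (quadratic in the body length) is replaced by a slice-based chunking pass that cuts the body into groups of three from the right and joins them with the dot separator in one pass, with the normalize step inlined.
import Mathlib
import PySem

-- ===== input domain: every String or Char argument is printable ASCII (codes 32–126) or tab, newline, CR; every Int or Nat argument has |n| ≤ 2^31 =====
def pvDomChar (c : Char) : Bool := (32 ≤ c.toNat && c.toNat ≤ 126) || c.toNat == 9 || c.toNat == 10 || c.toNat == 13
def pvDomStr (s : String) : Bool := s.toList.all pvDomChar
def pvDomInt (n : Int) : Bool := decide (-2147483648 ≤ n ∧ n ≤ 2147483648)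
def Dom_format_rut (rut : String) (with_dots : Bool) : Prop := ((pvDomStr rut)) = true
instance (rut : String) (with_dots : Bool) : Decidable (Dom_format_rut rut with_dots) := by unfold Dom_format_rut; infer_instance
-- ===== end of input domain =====

-- B replaces A's character-by-character loop (which repeatedly prepends to the accumulated
-- string, quadratic in the body length) with a linear slice-based chunking pass: groups of
-- three cut from the right and joined with the dot separator; the normalize step is inlined.

-- ===== PORT A =====
-- helper normalize_rut: none = IndexError on rut[-1] when the cleaned string is empty and has no dash
def pvNormalizeA (rut : List Char) : Option (List Char) :=
  -- rut = rut.replace(".", "").replace(" ", "").upper()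
  let r := PySem.Chars.upper (PySem.Chars.replace (PySem.Chars.replace rut ['.'] []) [' '] [])
  -- if "-" not in rut: rut = f"{rut[:-1]}-{rut[-1]}"
  if PySem.Chars.isIn ['-'] r then some r
  else
    match PySem.List.pyGet? r (-1) with
    | none => none                                     -- IndexError (excluded by Pre_)
    | some c => some (PySem.List.slice r none (some (-1)) ++ '-' :: [c])

def format_rut (rut : String) (with_dots : Bool) : String :=
  match pvNormalizeA rut.toList with
  | none => ""                                         -- unreachable under Pre_
  | some r =>
    if !with_dots then String.ofList r
    else
      -- body, dv = rut.split("-")  (ValueError unless exactly 2 parts; excluded by Pre_)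
      match PySem.Chars.split? r ['-'] with
      | some [body, dv] =>
        -- for i, digit in enumerate(reversed(body)): …
        let fb := (PySem.List.enumerate body.reverse 0).foldl
          (fun acc p =>
            let acc := if 0 < p.1 ∧ PySem.Int.mod p.1 3 = 0 then '.' :: acc else acc
            p.2 :: acc) []
        String.ofList (fb ++ '-' :: dv)
      | _ => ""                                        -- unreachable under Pre_

-- ===== PORT B =====
def format_rut_alt (rut : String) (with_dots : Bool) : String :=
  let c0 := PySem.Chars.upper (PySem.Chars.replace (PySem.Chars.replace rut.toList ['.'] []) [' '] [])
  -- if "-" not in cleaned: cleaned = cleaned[:-1] + "-" + cleaned[-1]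
  -- (none = IndexError on cleaned[-1]; excluded by Pre_, where B returns "")
  (if PySem.Chars.isIn ['-'] c0 then some c0
   else (PySem.List.pyGet? c0 (-1)).map
     (fun ch => PySem.List.slice c0 none (some (-1)) ++ '-' :: [ch])).elim ""
    (fun cleaned =>
      if !with_dots then String.ofList cleaned
      else
        -- body, dv = cleaned.split("-")  (the separator "-" is a nonempty literal, so
        -- Python's split never raises here and split? = some ∘ splitOn; the 2-way unpack
        -- raises ValueError unless exactly 2 parts — excluded by Pre_, where B returns "")
        match PySem.Chars.splitOn cleaned ['-'] with
        | [] => ""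
        | [_] => ""
        | _ :: _ :: _ :: _ => ""
        | [body, dv] =>
          -- groups = [body[max(0, i - 3):i] for i in range(len(body), 0, -3)]
          let groups := (PySem.List.pyRange (PySem.Chars.len body : Int) 0 (-3)).map
            (fun i => PySem.Chars.slice body (some (max 0 (i - 3))) (some i))
          -- ".".join(reversed(groups)) + "-" + dv
          String.ofList (PySem.Chars.join ['.'] groups.reverse ++ '-' :: dv))

-- ===== PRECONDITION & SPEC =====
-- Pre_ excludes exactly the inputs where the Python A raises: IndexError when the cleaned string is
-- empty and has no dash, and ValueError from the 2-way unpack of the split when with_dots and the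
-- cleaned string contains more than one dash. (B raises the same exceptions there.)
def Pre_format_rut (rut : String) (with_dots : Bool) : Prop :=
  let c := PySem.Chars.upper (PySem.Chars.replace (PySem.Chars.replace rut.toList ['.'] []) [' '] [])
  ('-' ∈ c ∨ c ≠ []) ∧ (with_dots = true → c.count '-' ≤ 1)
instance (rut : String) (with_dots : Bool) : Decidable (Pre_format_rut rut with_dots) := by
  unfold Pre_format_rut; infer_instance

def pvWitness_format_rut : String × Bool := ("76958020-3", true)

def Spec_format_rut (rut : String) (with_dots : Bool) (out : String) : Prop := out = format_rut_alt rut with_dots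
instance (rut : String) (with_dots : Bool) (out : String) : Decidable (Spec_format_rut rut with_dots out) := by unfold Spec_format_rut; infer_instance

-- ===== CLAIM (what is proved, stated in full; the proofs are below) =====
def Claim_equal_format_rut : Prop := ∀ (rut : String) (with_dots : Bool), Dom_format_rut rut with_dots → Pre_format_rut rut with_dots → Spec_format_rut rut with_dots (format_rut rut with_dots)

-- ===== LEMMAS AND PROOFS =====

def pvG : List Char → Int → List Char → List Char
  | [], _, acc => acc
  | c :: r, i, acc => pvG r (i + 1) (c :: (if 0 < i ∧ PySem.Int.mod i 3 = 0 then '.' :: acc else acc))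

lemma pvG_acc (l : List Char) : ∀ (i : Int) (acc : List Char), pvG l i acc = pvG l i [] ++ acc := by
  induction l with
  | nil => intro i acc; simp [pvG]
  | cons c r ih =>
    intro i acc
    show pvG r (i + 1) _ = pvG r (i + 1) _ ++ acc
    by_cases h : 0 < i ∧ PySem.Int.mod i 3 = 0
    · simp only [if_pos h]
      rw [ih (i + 1) (c :: '.' :: acc), ih (i + 1) [c, '.']]
      simp
    · simp only [if_neg h]
      rw [ih (i + 1) (c :: acc), ih (i + 1) [c]]
      simp

lemma pvMod_shift (i : Int) : PySem.Int.mod (i + 3) 3 = PySem.Int.mod i 3 := by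
  rw [PySem.Int.mod_eq_emod_of_pos (by norm_num), PySem.Int.mod_eq_emod_of_pos (by norm_num)]
  omega

lemma pvG_shift (l : List Char) : ∀ (i : Int), 1 ≤ i → ∀ acc, pvG l (i + 3) acc = pvG l i acc := by
  induction l with
  | nil => intro i _ acc; simp [pvG]
  | cons c r ih =>
    intro i hi acc
    show pvG r (i + 3 + 1) _ = pvG r (i + 1) _
    have hc : (0 < i + 3 ∧ PySem.Int.mod (i + 3) 3 = 0) ↔ (0 < i ∧ PySem.Int.mod i 3 = 0) := by
      rw [pvMod_shift]
      constructor <;> intro h <;> exact ⟨by omega, h.2⟩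
    have h4 : i + 3 + 1 = (i + 1) + 3 := by omega
    rw [h4, ih (i + 1) (by omega)]
    congr 1
    simp only [hc]

lemma pvG_dot (l : List Char) (acc : List Char) (h : l ≠ []) :
    pvG l 3 acc = pvG l 0 [] ++ '.' :: acc := by
  match l with
  | c :: r =>
    have h3 : (0 < (3:Int) ∧ PySem.Int.mod 3 3 = 0) := ⟨by norm_num, by decide⟩
    have h0 : ¬ (0 < (0:Int) ∧ PySem.Int.mod 0 3 = 0) := fun h => absurd h.1 (by norm_num)
    simp only [pvG, if_pos h3, if_neg h0]
    have h4 : (3 : Int) + 1 = 1 + 3 := by norm_num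
    rw [h4, pvG_shift r 1 le_rfl]
    rw [pvG_acc r 1 (c :: '.' :: acc), pvG_acc r (0 + 1) [c]]
    simp

lemma pvFoldl_eq_g (l : List Char) : ∀ (i : Int) (acc : List Char),
    (PySem.List.enumerate l i).foldl
      (fun acc p =>
        let acc := if 0 < p.1 ∧ PySem.Int.mod p.1 3 = 0 then '.' :: acc else acc
        p.2 :: acc) acc = pvG l i acc := by
  induction l with
  | nil => intro i acc; simp [PySem.List.enumerate_nil, pvG]
  | cons c r ih => intro i acc; rw [PySem.List.enumerate_cons]; simp only [List.foldl]; exact ih _ _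


def pvChunk (l : List Char) : List Char :=
  if l.length ≤ 3 then l
  else pvChunk (l.take (l.length - 3)) ++ '.' :: l.drop (l.length - 3)
termination_by l.length
decreasing_by simp; omega

lemma pvJoin_snoc (sep b : List Char) : ∀ (as_ : List (List Char)), as_ ≠ [] →
    PySem.Chars.join sep (as_ ++ [b]) = PySem.Chars.join sep as_ ++ sep ++ b := by
  intro as_
  induction as_ with
  | nil => intro h; exact absurd rfl h
  | cons x t ih =>
    intro _
    match t with
    | [] => simp [PySem.Chars.join_cons_cons, PySem.Chars.join_singleton]
    | y :: t' =>
      have h1 := ih (by simp)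
      rw [show (x :: y :: t') ++ [b] = x :: ((y :: t') ++ [b]) from rfl]
      rw [show (y :: t') ++ [b] = y :: (t' ++ [b]) from rfl]
      rw [PySem.Chars.join_cons_cons, PySem.Chars.join_cons_cons]
      rw [show (y :: (t' ++ [b])) = (y :: t') ++ [b] from rfl, h1]
      simp
lemma pvRange_neg3_nil (n : Int) (h : n ≤ 0) : PySem.List.pyRange n 0 (-3) = [] := by
  simp only [PySem.List.pyRange]
  norm_num
  intro h'
  omega

lemma pvRange_neg3_cons (n : Int) (h : 0 < n) :
    PySem.List.pyRange n 0 (-3) = n :: PySem.List.pyRange (n - 3) 0 (-3) := by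
  simp only [PySem.List.pyRange]
  norm_num
  rw [if_pos h]
  by_cases h3 : 3 < n
  · rw [if_pos h3]
    have hk : ((n + 3 - 1) / 3).toNat = ((n - 1) / 3).toNat + 1 := by omega
    rw [hk, List.range_succ_eq_map, List.map_cons, List.map_map]
    congr 1
    · norm_num
    · apply List.map_congr_left
      intro k _
      simp [Nat.succ_eq_add_one]
      ring
  · rw [if_neg h3]
    have hk : ((n + 3 - 1) / 3).toNat = 1 := by omega
    rw [hk]
    simp


lemma pvG_small (l : List Char) (h : l.length ≤ 3) : pvG l.reverse 0 [] = l := by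
  match l, h with
  | [], _ => rfl
  | [a], _ => simp [pvG]
  | [a, b], _ => norm_num [pvG, PySem.Int.mod, show Int.fmod 1 3 = 1 from by decide]
  | [a, b, c], _ =>
      norm_num [pvG, PySem.Int.mod, show Int.fmod 1 3 = 1 from by decide,
        show Int.fmod 2 3 = 2 from by decide]

lemma pvG_append (xs : List Char) : ∀ (ys : List Char) (i : Int) (acc : List Char),
    pvG (xs ++ ys) i acc = pvG ys (i + xs.length) (pvG xs i acc) := by
  induction xs with
  | nil => intro ys i acc; simp [pvG]
  | cons c r ih =>
    intro ys i acc
    show pvG (r ++ ys) (i + 1) _ = _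
    rw [ih ys (i + 1) _]
    congr 1
    simp
    omega

lemma pvA_eq_chunk (l : List Char) : pvG l.reverse 0 [] = pvChunk l := by
  by_cases h : l.length ≤ 3
  · rw [pvG_small l h, pvChunk, if_pos h]
  · have hlen : 3 < l.length := by omega
    have hsplit : l = l.take (l.length - 3) ++ l.drop (l.length - 3) := (List.take_append_drop _ _).symm
    have hd : (l.drop (l.length - 3)).length = 3 := by simp; omega
    have ht : (l.take (l.length - 3)).length = l.length - 3 := by simp
    have htne : l.take (l.length - 3) ≠ [] := by
      intro hc; have := congrArg List.length hc; simp [ht] at this; omega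
    calc pvG l.reverse 0 []
        = pvG ((l.drop (l.length - 3)).reverse ++ (l.take (l.length - 3)).reverse) 0 [] := by
          conv_lhs => rw [hsplit]
          rw [List.reverse_append]
      _ = pvG (l.take (l.length - 3)).reverse (0 + (l.drop (l.length - 3)).reverse.length)
            (pvG (l.drop (l.length - 3)).reverse 0 []) := pvG_append _ _ _ _
      _ = pvG (l.take (l.length - 3)).reverse 3 (l.drop (l.length - 3)) := by
          rw [pvG_small _ (by omega), List.length_reverse, hd]; norm_num
      _ = pvG (l.take (l.length - 3)).reverse 0 [] ++ '.' :: l.drop (l.length - 3) := by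
          rw [pvG_dot _ _ (by simpa using htne)]
      _ = pvChunk (l.take (l.length - 3)) ++ '.' :: l.drop (l.length - 3) := by
          rw [pvA_eq_chunk (l.take (l.length - 3))]
      _ = pvChunk l := by conv_rhs => rw [pvChunk, if_neg h]
termination_by l.length
decreasing_by simp; omega



lemma pvB_eq_chunk (n : Nat) (l : List Char) (hn : n ≤ l.length) :
    PySem.Chars.join ['.']
      (((PySem.List.pyRange (n : Int) 0 (-3)).map
        (fun i => PySem.List.slice l (some (max 0 (i - 3))) (some i))).reverse)
      = pvChunk (l.take n) := by
  by_cases h0 : n = 0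
  · subst h0
    push_cast
    rw [pvRange_neg3_nil 0 le_rfl]
    simp [PySem.Chars.join_nil, pvChunk]
  by_cases h3 : n ≤ 3
  · -- one group: the whole body
    rw [pvRange_neg3_cons _ (by exact_mod_cast Nat.pos_of_ne_zero h0),
        pvRange_neg3_nil _ (by omega)]
    have hm : max 0 ((n : Int) - 3) = ((0 : Nat) : Int) := by simp; omega
    simp only [List.map_cons, List.map_nil, List.reverse_cons, List.reverse_nil, List.nil_append,
      hm, PySem.List.slice_natCast, PySem.Chars.join_singleton]
    rw [pvChunk, if_pos (by simp; omega)]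
    simp
  · -- n > 3: peel the last group of three
    have h3' : 3 < n := by omega
    have hcast : ((n : Int) - 3) = ((n - 3 : Nat) : Int) := by omega
    rw [pvRange_neg3_cons _ (by exact_mod_cast Nat.pos_of_ne_zero h0)]
    have hm : max 0 ((n : Int) - 3) = ((n - 3 : Nat) : Int) := by omega
    rw [List.map_cons, List.reverse_cons]
    have htail_ne : ((PySem.List.pyRange ((n : Int) - 3) 0 (-3)).map
        (fun i => PySem.List.slice l (some (max 0 (i - 3))) (some i))).reverse ≠ [] := by
      rw [hcast, pvRange_neg3_cons _ (by exact_mod_cast (by omega : 0 < n - 3))]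
      simp
    rw [pvJoin_snoc _ _ _ htail_ne]
    rw [hcast] at *
    rw [pvB_eq_chunk (n - 3) l (by omega)]
    rw [hm, PySem.List.slice_natCast]
    conv_rhs => rw [pvChunk, if_neg (by simp; omega)]
    have e1 : (l.take n).length = n := by simp; omega
    simp only [e1, List.take_take, List.drop_take]
    have e2 : min (n - 3) n = n - 3 := by omega
    have e3 : n - (n - 3) = 3 := by omega
    rw [e2, e3]
    simp
termination_by n
decreasing_by omega

lemma pvTail (r : List Char) (wd : Bool) :
    (if !wd then String.ofList r
     else
       match PySem.Chars.split? r ['-'] with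
       | some [body, dv] =>
         let fb := (PySem.List.enumerate body.reverse 0).foldl
           (fun acc p =>
             let acc := if 0 < p.1 ∧ PySem.Int.mod p.1 3 = 0 then '.' :: acc else acc
             p.2 :: acc) []
         String.ofList (fb ++ '-' :: dv)
       | _ => "")
    = (if !wd then String.ofList r
       else
         match PySem.Chars.splitOn r ['-'] with
         | [] => ""
         | [_] => ""
         | _ :: _ :: _ :: _ => ""
         | [body, dv] =>
           let groups := (PySem.List.pyRange (PySem.Chars.len body : Int) 0 (-3)).map
             (fun i => PySem.Chars.slice body (some (max 0 (i - 3))) (some i))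
           String.ofList (PySem.Chars.join ['.'] groups.reverse ++ '-' :: dv)) := by
  cases wd with
  | false => rfl
  | true =>
    simp only [Bool.not_true, if_neg (by decide : ¬ false = true)]
    rw [show PySem.Chars.split? r ['-'] = some (PySem.Chars.splitOn r ['-']) from by
      simp [PySem.Chars.split?]]
    cases hs : PySem.Chars.splitOn r ['-'] with
    | nil => rfl
    | cons b t =>
      cases t with
      | nil => rfl
      | cons d t2 =>
        cases t2 with
        | nil =>
          show String.ofList _ = String.ofList _
          congr 1
          rw [pvFoldl_eq_g, pvA_eq_chunk b]
          have := pvB_eq_chunk b.length b (le_refl _)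
          rw [List.take_length] at this
          rw [← this]
          simp [PySem.Chars.len_eq, PySem.Chars.slice_eq_listSlice]
        | cons e t3 => rfl

-- ===== VERDICT (by name: the statement is the Claim_ definition above) =====
theorem format_rut_spec : Claim_equal_format_rut := by
  intro rut with_dots _ _
  unfold Spec_format_rut
  simp only [format_rut, format_rut_alt, pvNormalizeA]
  by_cases hin : PySem.Chars.isIn ['-'] (PySem.Chars.upper (PySem.Chars.replace (PySem.Chars.replace rut.toList ['.'] []) [' '] [])) = true
  · rw [if_pos hin, if_pos hin]
    exact pvTail _ with_dots
  · rw [if_neg hin, if_neg hin]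
    cases hg : PySem.List.pyGet? (PySem.Chars.upper (PySem.Chars.replace (PySem.Chars.replace rut.toList ['.'] []) [' '] [])) (-1) with
    | none => rfl
    | some ch => exact pvTail _ with_dots
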